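-- pv_equiv track=rewrite | github.com/deepak01-Hacker/Interview-Question-Practice | #Vowel and Consonant Substrings!.py | solve
-- ===== SOURCE A (Python) =====
-- def isVowel(char):
--     return True if char in ['a','e','i','o','u'] else False
--
-- def solve(s):
--     v = 0
--     c = 0
--     ans = 0
--     for i in range(0,len(s)):
--
--         if isVowel(s[i]) and c > 0:
--             ans += c
--
--         elif isVowel(s[i]) == False and v > 0:
--             ans += v
--
--         v += 1 if isVowel(s[i]) else 0
--         c += 1 if isVowel(s[i])==False else 0
--
--     return ans%((10**9)+7)
-- ===== SOURCE B (Python) =====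
-- def solve(s):
--     nv = sum(1 for ch in s if ch in 'aeiou')
--     return nv * (len(s) - nv) % (10**9 + 7)
-- ===== Notes on version B (the rewrite author's own statement) =====
-- stated objective: faster
-- what changed: Replaces the running dual-accumulator loop by the closed form (#vowels x #non-vowels) mod 1e9+7, computed from a single vowel count.
import Mathlib
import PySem

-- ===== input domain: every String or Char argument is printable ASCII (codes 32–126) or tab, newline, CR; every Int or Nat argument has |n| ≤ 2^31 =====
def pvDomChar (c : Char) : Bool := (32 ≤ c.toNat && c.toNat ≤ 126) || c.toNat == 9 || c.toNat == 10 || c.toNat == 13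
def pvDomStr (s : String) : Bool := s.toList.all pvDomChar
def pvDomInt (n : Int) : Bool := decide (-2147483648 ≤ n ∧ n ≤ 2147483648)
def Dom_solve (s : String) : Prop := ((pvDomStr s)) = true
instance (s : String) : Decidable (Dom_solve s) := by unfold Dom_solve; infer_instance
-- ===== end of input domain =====

-- B replaces A's running dual-accumulator loop by the closed form (#vowels × #non-vowels) mod 1e9+7 (constant-factor simplification).

-- ===== PORT A =====
def isVowel (ch : Char) : Bool := if ch ∈ ['a','e','i','o','u'] then true else false

def solveStep (st : Int × Int × Int) (ch : Char) : Int × Int × Int :=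
  let v := st.1; let c := st.2.1; let ans := st.2.2
  let ans' := if isVowel ch ∧ c > 0 then ans + c
              else if (isVowel ch = false) ∧ v > 0 then ans + v
              else ans
  (v + (if isVowel ch then 1 else 0), c + (if isVowel ch = false then 1 else 0), ans')

def solve (s : String) : Int :=
  let st := s.toList.foldl solveStep (0, 0, 0)
  PySem.Int.mod st.2.2 (10 ^ 9 + 7)

-- ===== PORT B =====
def solve_alt (s : String) : Int :=
  let nv : Int := (s.toList.filter (fun ch => ch ∈ "aeiou".toList)).length
  PySem.Int.mod (nv * ((s.toList.length : Int) - nv)) (10 ^ 9 + 7)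

-- ===== PRECONDITION & SPEC =====
def Spec_solve (s : String) (out : Int) : Prop := out = solve_alt s
instance (s : String) (out : Int) : Decidable (Spec_solve s out) := by unfold Spec_solve; infer_instance

-- ===== CLAIM (what is proved, stated in full; the proofs are below) =====
def Claim_equal_solve : Prop := ∀ (s : String), Dom_solve s → Spec_solve s (solve s)

-- ===== LEMMAS AND PROOFS =====

lemma solve_invariant (l : List Char) (v c : Int) (hv : 0 ≤ v) (hc : 0 ≤ c) :
    l.foldl solveStep (v, c, v * c) =
      (v + ((l.filter isVowel).length : Int),
       c + ((l.filter (fun ch => !isVowel ch)).length : Int),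
       (v + ((l.filter isVowel).length : Int)) * (c + ((l.filter (fun ch => !isVowel ch)).length : Int))) := by
  induction l generalizing v c with
  | nil => simp
  | cons ch l ih =>
    rw [List.foldl_cons]
    by_cases hch : isVowel ch
    · have hstep : solveStep (v, c, v * c) ch = (v + 1, c, (v + 1) * c) := by
        simp only [solveStep, hch]
        rcases lt_or_eq_of_le hc with h | h
        · simp [h, h.le]; ring_nf
        · simp [← h]
      rw [hstep, ih (v + 1) c (by omega) hc]
      simp only [List.filter_cons, hch, Bool.not_true, List.length_cons, Prod.mk.injEq,
        if_true, if_false, Bool.false_eq_true, ite_false, ite_true, Nat.cast_add, Nat.cast_one]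
      refine ⟨?_, ?_, ?_⟩ <;> first | trivial | omega | ring
    · have hb : isVowel ch = false := by simpa using hch
      have hstep : solveStep (v, c, v * c) ch = (v, c + 1, v * (c + 1)) := by
        simp only [solveStep, hb]
        rcases lt_or_eq_of_le hv with h | h
        · simp [h, h.le]; ring_nf
        · simp [← h]
      rw [hstep, ih v (c + 1) hv (by omega)]
      simp only [List.filter_cons, hb, Bool.not_false, List.length_cons, Prod.mk.injEq,
        if_true, if_false, Bool.false_eq_true, ite_false, ite_true, Nat.cast_add, Nat.cast_one]
      refine ⟨?_, ?_, ?_⟩ <;> first | trivial | omega | ring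

lemma filter_vowel_eq (l : List Char) :
    l.filter isVowel = l.filter (fun ch => ch ∈ "aeiou".toList) := by
  apply List.filter_congr
  intro ch _
  simp [isVowel]

lemma filter_not_len (l : List Char) :
    ((l.filter (fun ch => !isVowel ch)).length : Int) =
      (l.length : Int) - ((l.filter isVowel).length : Int) := by
  induction l with
  | nil => simp
  | cons ch l ih =>
    by_cases hch : isVowel ch <;> simp [hch] <;> omega

-- ===== VERDICT (by name: the statement is the Claim_ definition above) =====
theorem solve_spec : Claim_equal_solve := by
  intro s _
  unfold Spec_solve solve solve_alt
  have h := solve_invariant s.toList 0 0 le_rfl le_rfl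
  simp only [zero_mul] at h
  rw [h]
  rw [filter_vowel_eq, filter_not_len]
  simp [filter_vowel_eq]
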